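-- pv_equiv track=rewrite | github.com/Wpawlina/AGH-ITCS-Course | cwiczenia/tablice dwuwymiarowe 4/sumSachWieze202.py | sumOfTableWithout
-- ===== SOURCE A (Python) =====
-- def sumOfTableWithout(t,r1,c1,r2,c2):
--     n=len(t)
--     sum=0
--     for i in range(n):
--         for j in range(n):
--             if i!=r1 and i!=r2 and j!=c1 and j!=c2:
--                 sum+=t[i][j]
--     return sum
-- ===== SOURCE B (Python) =====
-- def sumOfTableWithout(t, r1, c1, r2, c2):
--     # inclusion-exclusion: grand total minus excluded row/column sums, re-adding intersections
--     n = len(t)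
--     row = [sum(t[i][j] for j in range(n)) for i in range(n)]
--     col = [sum(t[i][j] for i in range(n)) for j in range(n)]
--     rows = [r1] + ([r2] if r2 != r1 else [])
--     cols = [c1] + ([c2] if c2 != c1 else [])
--     res = sum(row)
--     for r in rows:
--         if 0 <= r < n:
--             res -= row[r]
--     for c in cols:
--         if 0 <= c < n:
--             res -= col[c]
--     for r in rows:
--         for c in cols:
--             if 0 <= r < n and 0 <= c < n:
--                 res += t[r][c]
--     return res
-- ===== Notes on version B (the rewrite author's own statement) =====
-- stated objective: alternative
-- what changed: Replaces A's per-cell four-way exclusion test inside the double loop by inclusion-exclusion: grand total minus precomputed row/column sums of the excluded indices plus their re-added intersections.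
-- outside the precondition, e.g. on sumOfTableWithout([[1, 2], [3]], 1, -1, 1, -1): A returns 3, B raises IndexError
import Mathlib
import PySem

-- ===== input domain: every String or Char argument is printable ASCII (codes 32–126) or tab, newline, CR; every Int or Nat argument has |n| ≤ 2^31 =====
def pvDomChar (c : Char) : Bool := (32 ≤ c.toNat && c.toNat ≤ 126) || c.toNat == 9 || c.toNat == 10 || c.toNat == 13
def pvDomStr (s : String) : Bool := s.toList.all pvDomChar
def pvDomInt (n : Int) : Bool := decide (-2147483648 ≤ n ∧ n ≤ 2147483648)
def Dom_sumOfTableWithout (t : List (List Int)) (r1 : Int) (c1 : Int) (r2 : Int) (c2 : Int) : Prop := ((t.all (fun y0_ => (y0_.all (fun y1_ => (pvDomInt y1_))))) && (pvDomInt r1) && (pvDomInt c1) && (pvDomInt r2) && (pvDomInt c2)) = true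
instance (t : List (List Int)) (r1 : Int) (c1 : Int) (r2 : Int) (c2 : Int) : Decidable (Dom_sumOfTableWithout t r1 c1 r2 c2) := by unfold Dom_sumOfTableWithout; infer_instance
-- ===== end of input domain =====

-- B replaces A's per-cell exclusion test by inclusion–exclusion over precomputed row/column sums (alternative decomposition, same asymptotic cost).

-- ===== PORT A =====
def sumOfTableWithout (t : List (List Int)) (r1 : Int) (c1 : Int) (r2 : Int) (c2 : Int) : Int :=
  let n : Int := t.length
  (PySem.List.pyRange 0 n).foldl (fun sum i =>
    (PySem.List.pyRange 0 n).foldl (fun sum j =>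
      if i ≠ r1 ∧ i ≠ r2 ∧ j ≠ c1 ∧ j ≠ c2 then
        sum + PySem.List.pyGetD (PySem.List.pyGetD t i []) j 0
      else sum) sum) 0

-- ===== PORT B =====
def sumOfTableWithout_alt (t : List (List Int)) (r1 : Int) (c1 : Int) (r2 : Int) (c2 : Int) : Int :=
  let n : Int := t.length
  let row := (PySem.List.pyRange 0 n).map (fun i =>
    (PySem.List.pyRange 0 n).foldl (fun acc j => acc + PySem.List.pyGetD (PySem.List.pyGetD t i []) j 0) 0)
  let col := (PySem.List.pyRange 0 n).map (fun j =>
    (PySem.List.pyRange 0 n).foldl (fun acc i => acc + PySem.List.pyGetD (PySem.List.pyGetD t i []) j 0) 0)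
  let rows := [r1] ++ (if r2 ≠ r1 then [r2] else [])
  let cols := [c1] ++ (if c2 ≠ c1 then [c2] else [])
  let res := row.sum
  let res := rows.foldl (fun res r => if 0 ≤ r ∧ r < n then res - PySem.List.pyGetD row r 0 else res) res
  let res := cols.foldl (fun res c => if 0 ≤ c ∧ c < n then res - PySem.List.pyGetD col c 0 else res) res
  let res := rows.foldl (fun res r => cols.foldl (fun res c =>
    if (0 ≤ r ∧ r < n) ∧ (0 ≤ c ∧ c < n) then res + PySem.List.pyGetD (PySem.List.pyGetD t r []) c 0 else res) res) res
  res

-- ===== PRECONDITION & SPEC =====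
-- Pre_ excludes ragged tables with a row shorter than len(t): A raises IndexError on most of
-- them, and on the few where every short row happens to be excluded by r1/r2 (A still returns),
-- B's row/column precomputation naturally raises IndexError, so those inputs are excluded too.
def Pre_sumOfTableWithout (t : List (List Int)) (r1 : Int) (c1 : Int) (r2 : Int) (c2 : Int) : Prop :=
  ∀ row ∈ t, t.length ≤ row.length
instance (t : List (List Int)) (r1 : Int) (c1 : Int) (r2 : Int) (c2 : Int) : Decidable (Pre_sumOfTableWithout t r1 c1 r2 c2) := by unfold Pre_sumOfTableWithout; infer_instance

def pvWitness_sumOfTableWithout : List (List Int) × Int × Int × Int × Int := ([[1, 2], [3, 4]], 0, 1, 1, 0)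

def Spec_sumOfTableWithout (t : List (List Int)) (r1 : Int) (c1 : Int) (r2 : Int) (c2 : Int) (out : Int) : Prop := out = sumOfTableWithout_alt t r1 c1 r2 c2
instance (t : List (List Int)) (r1 : Int) (c1 : Int) (r2 : Int) (c2 : Int) (out : Int) : Decidable (Spec_sumOfTableWithout t r1 c1 r2 c2 out) := by unfold Spec_sumOfTableWithout; infer_instance

-- ===== CLAIM (what is proved, stated in full; the proofs are below) =====
def Claim_equal_sumOfTableWithout : Prop := ∀ (t : List (List Int)) (r1 : Int) (c1 : Int) (r2 : Int) (c2 : Int), Dom_sumOfTableWithout t r1 c1 r2 c2 → Pre_sumOfTableWithout t r1 c1 r2 c2 → Spec_sumOfTableWithout t r1 c1 r2 c2 (sumOfTableWithout t r1 c1 r2 c2)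

-- ===== LEMMAS AND PROOFS =====

-- table cell t[i][j] (both ports read it through pyGetD with default 0)
def pvCell (t : List (List Int)) (i j : Nat) : Int := (t.getD i []).getD j 0
def pvRowS (t : List (List Int)) (i : Nat) : Int := ∑ j ∈ Finset.range t.length, pvCell t i j
def pvColS (t : List (List Int)) (j : Nat) : Int := ∑ i ∈ Finset.range t.length, pvCell t i j

-- the common inclusion–exclusion value both ports are reduced to
def pvE (t : List (List Int)) (r1 c1 r2 c2 : Int) : Int :=
  let n : Int := t.length
  (∑ i ∈ Finset.range t.length, pvRowS t i)
  - ((if 0 ≤ r1 ∧ r1 < n then pvRowS t r1.toNat else 0)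
     + (if r2 ≠ r1 ∧ 0 ≤ r2 ∧ r2 < n then pvRowS t r2.toNat else 0))
  - ((if 0 ≤ c1 ∧ c1 < n then pvColS t c1.toNat else 0)
     + (if c2 ≠ c1 ∧ 0 ≤ c2 ∧ c2 < n then pvColS t c2.toNat else 0))
  + ((if 0 ≤ r1 ∧ r1 < n then
        (if 0 ≤ c1 ∧ c1 < n then pvCell t r1.toNat c1.toNat else 0)
        + (if c2 ≠ c1 ∧ 0 ≤ c2 ∧ c2 < n then pvCell t r1.toNat c2.toNat else 0) else 0)
     + (if r2 ≠ r1 ∧ 0 ≤ r2 ∧ r2 < n then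
        (if 0 ≤ c1 ∧ c1 < n then pvCell t r2.toNat c1.toNat else 0)
        + (if c2 ≠ c1 ∧ 0 ≤ c2 ∧ c2 < n then pvCell t r2.toNat c2.toNat else 0) else 0))

-- list-sum over range = Finset.sum over range (definitional)
lemma pv_sum_range (n : Nat) (f : Nat → Int) : ((List.range n).map f).sum = ∑ i ∈ Finset.range n, f i := rfl

-- foldl with a guarded accumulator is an init plus a guarded sum
lemma pv_foldl_ite_add {α : Type} (l : List α) (p : α → Prop) [DecidablePred p] (g : α → Int) (a : Int) :
    l.foldl (fun acc x => if p x then acc + g x else acc) a = a + (l.map (fun x => if p x then g x else 0)).sum := by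
  induction l generalizing a with
  | nil => simp
  | cons x xs ih => by_cases h : p x <;> simp [h, ih] <;> ring

-- pick out at most one index from a range sum
lemma pv_pick1 (n : Nat) (r : Int) (g : Nat → Int) :
    (∑ i ∈ Finset.range n, if (i : Int) = r then g i else 0)
      = if 0 ≤ r ∧ r < (n : Int) then g r.toNat else 0 := by
  by_cases h : 0 ≤ r ∧ r < (n : Int)
  · have hr : r = (r.toNat : Int) := by omega
    have : ∀ i ∈ Finset.range n, (if (i : Int) = r then g i else 0) = (if i = r.toNat then g i else 0) := by
      intro i _
      congr 1
      simp only [eq_iff_iff]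
      omega
    rw [Finset.sum_congr rfl this, Finset.sum_ite_eq']
    simp only [Finset.mem_range]
    rw [if_pos (by omega), if_pos h]
  · rw [if_neg h]
    apply Finset.sum_eq_zero
    intro i hi
    simp only [Finset.mem_range] at hi
    rw [if_neg (by omega)]

-- pick out the two (possibly equal, possibly out-of-range) excluded indices
lemma pv_pick2 (n : Nat) (r1 r2 : Int) (g : Nat → Int) :
    (∑ i ∈ Finset.range n, if ((i : Int) = r1 ∨ (i : Int) = r2) then g i else 0)
      = (if 0 ≤ r1 ∧ r1 < (n : Int) then g r1.toNat else 0)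
        + (if r2 ≠ r1 ∧ 0 ≤ r2 ∧ r2 < (n : Int) then g r2.toNat else 0) := by
  by_cases hne : r2 = r1
  · subst hne
    simp only [or_self]
    rw [pv_pick1]
    simp
  · have : ∀ i ∈ Finset.range n, (if ((i : Int) = r1 ∨ (i : Int) = r2) then g i else 0)
        = (if (i : Int) = r1 then g i else 0) + (if (i : Int) = r2 then g i else 0) := by
      intro i _
      by_cases h1 : (i : Int) = r1 <;> by_cases h2 : (i : Int) = r2 <;>
        simp_all
    rw [Finset.sum_congr rfl this, Finset.sum_add_distrib, pv_pick1, pv_pick1]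
    congr 1
    by_cases h2 : 0 ≤ r2 ∧ r2 < (n : Int) <;> simp [h2, hne]

-- the per-cell inclusion–exclusion identity
lemma pv_cell_split (v : Int) (P Q : Prop) [Decidable P] [Decidable Q] :
    (if ¬P ∧ ¬Q then v else 0)
      = v - (if P then v else 0) - (if Q then v else 0) + (if P ∧ Q then v else 0) := by
  by_cases hp : P <;> by_cases hq : Q <;> simp [hp, hq]

-- A's double loop equals the inclusion–exclusion value
lemma pv_A_eq (t : List (List Int)) (r1 c1 r2 c2 : Int) :
    sumOfTableWithout t r1 c1 r2 c2 = pvE t r1 c1 r2 c2 := by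
  unfold sumOfTableWithout
  dsimp only
  rw [PySem.List.pyRange_zero]
  simp only [Int.toNat_natCast, List.foldl_map]
  have hinner : ∀ (s : Int) (i : Nat),
      (List.range t.length).foldl (fun sum (j : Nat) =>
        if ((i : Int) ≠ r1 ∧ (i : Int) ≠ r2 ∧ (j : Int) ≠ c1 ∧ (j : Int) ≠ c2) then
          sum + PySem.List.pyGetD (PySem.List.pyGetD t (i : Int) []) (j : Int) 0
        else sum) s
      = s + ∑ j ∈ Finset.range t.length,
          (if ((i : Int) ≠ r1 ∧ (i : Int) ≠ r2 ∧ (j : Int) ≠ c1 ∧ (j : Int) ≠ c2) then pvCell t i j else 0) := by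
    intro s i
    rw [pv_foldl_ite_add (List.range t.length)
      (fun j : Nat => ((i : Int) ≠ r1 ∧ (i : Int) ≠ r2 ∧ (j : Int) ≠ c1 ∧ (j : Int) ≠ c2))
      (fun j : Nat => PySem.List.pyGetD (PySem.List.pyGetD t (i : Int) []) (j : Int) 0) s]
    rw [pv_sum_range]
    congr 1
    apply Finset.sum_congr rfl
    intro j _
    simp [PySem.List.pyGetD_natCast, pvCell]
  rw [List.foldl_ext _ (fun (s : Int) (i : Nat) => s + ∑ j ∈ Finset.range t.length,
        (if ((i : Int) ≠ r1 ∧ (i : Int) ≠ r2 ∧ (j : Int) ≠ c1 ∧ (j : Int) ≠ c2) then pvCell t i j else 0)) 0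
      (fun s i _ => hinner s i)]
  rw [PySem.List.foldl_add, pv_sum_range, zero_add]
  -- split each cell by inclusion–exclusion and pick out the excluded indices
  have step : ∀ i j : Nat,
      (if ((i : Int) ≠ r1 ∧ (i : Int) ≠ r2 ∧ (j : Int) ≠ c1 ∧ (j : Int) ≠ c2) then pvCell t i j else 0)
      = pvCell t i j
        - (if ((i : Int) = r1 ∨ (i : Int) = r2) then pvCell t i j else 0)
        - (if ((j : Int) = c1 ∨ (j : Int) = c2) then pvCell t i j else 0)
        + (if (((i : Int) = r1 ∨ (i : Int) = r2) ∧ ((j : Int) = c1 ∨ (j : Int) = c2)) then pvCell t i j else 0) := by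
    intro i j
    rw [← pv_cell_split (pvCell t i j) ((i : Int) = r1 ∨ (i : Int) = r2) ((j : Int) = c1 ∨ (j : Int) = c2)]
    congr 1
    simp only [eq_iff_iff]
    tauto
  simp only [step, Finset.sum_add_distrib, Finset.sum_sub_distrib]
  have hR : (∑ i ∈ Finset.range t.length, ∑ j ∈ Finset.range t.length,
        if ((i : Int) = r1 ∨ (i : Int) = r2) then pvCell t i j else 0)
      = (if 0 ≤ r1 ∧ r1 < (t.length : Int) then pvRowS t r1.toNat else 0)
        + (if r2 ≠ r1 ∧ 0 ≤ r2 ∧ r2 < (t.length : Int) then pvRowS t r2.toNat else 0) := by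
    have h : ∀ i ∈ Finset.range t.length,
        (∑ j ∈ Finset.range t.length, if ((i : Int) = r1 ∨ (i : Int) = r2) then pvCell t i j else 0)
        = (if ((i : Int) = r1 ∨ (i : Int) = r2) then pvRowS t i else 0) := by
      intro i _
      by_cases h : ((i : Int) = r1 ∨ (i : Int) = r2) <;> simp [h, pvRowS]
    rw [Finset.sum_congr rfl h, pv_pick2]
  have hC : (∑ i ∈ Finset.range t.length, ∑ j ∈ Finset.range t.length,
        if ((j : Int) = c1 ∨ (j : Int) = c2) then pvCell t i j else 0)
      = (if 0 ≤ c1 ∧ c1 < (t.length : Int) then pvColS t c1.toNat else 0)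
        + (if c2 ≠ c1 ∧ 0 ≤ c2 ∧ c2 < (t.length : Int) then pvColS t c2.toNat else 0) := by
    rw [Finset.sum_comm]
    have h : ∀ j ∈ Finset.range t.length,
        (∑ i ∈ Finset.range t.length, if ((j : Int) = c1 ∨ (j : Int) = c2) then pvCell t i j else 0)
        = (if ((j : Int) = c1 ∨ (j : Int) = c2) then pvColS t j else 0) := by
      intro j _
      by_cases h : ((j : Int) = c1 ∨ (j : Int) = c2) <;> simp [h, pvColS]
    rw [Finset.sum_congr rfl h, pv_pick2]
  have hX : (∑ i ∈ Finset.range t.length, ∑ j ∈ Finset.range t.length,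
        if (((i : Int) = r1 ∨ (i : Int) = r2) ∧ ((j : Int) = c1 ∨ (j : Int) = c2)) then pvCell t i j else 0)
      = (if 0 ≤ r1 ∧ r1 < (t.length : Int) then
          (if 0 ≤ c1 ∧ c1 < (t.length : Int) then pvCell t r1.toNat c1.toNat else 0)
          + (if c2 ≠ c1 ∧ 0 ≤ c2 ∧ c2 < (t.length : Int) then pvCell t r1.toNat c2.toNat else 0) else 0)
        + (if r2 ≠ r1 ∧ 0 ≤ r2 ∧ r2 < (t.length : Int) then
          (if 0 ≤ c1 ∧ c1 < (t.length : Int) then pvCell t r2.toNat c1.toNat else 0)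
          + (if c2 ≠ c1 ∧ 0 ≤ c2 ∧ c2 < (t.length : Int) then pvCell t r2.toNat c2.toNat else 0) else 0) := by
    have h : ∀ i ∈ Finset.range t.length,
        (∑ j ∈ Finset.range t.length,
          if (((i : Int) = r1 ∨ (i : Int) = r2) ∧ ((j : Int) = c1 ∨ (j : Int) = c2)) then pvCell t i j else 0)
        = (if ((i : Int) = r1 ∨ (i : Int) = r2) then
            ∑ j ∈ Finset.range t.length, (if ((j : Int) = c1 ∨ (j : Int) = c2) then pvCell t i j else 0)
           else 0) := by
      intro i _
      by_cases h : ((i : Int) = r1 ∨ (i : Int) = r2) <;> simp [h]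
    rw [Finset.sum_congr rfl h, pv_pick2]
    simp only [pv_pick2]
  rw [hR, hC, hX]
  unfold pvE pvRowS
  dsimp only

-- B equals the inclusion–exclusion value: row/column precomputations and guarded corrections
lemma pv_fval (t : List (List Int)) (i : Nat) :
    (PySem.List.pyRange 0 (t.length : Int)).foldl
      (fun acc j => acc + PySem.List.pyGetD (PySem.List.pyGetD t (i : Int) []) j 0) 0 = pvRowS t i := by
  rw [PySem.List.pyRange_zero]
  simp only [Int.toNat_natCast, List.foldl_map, PySem.List.foldl_add, pv_sum_range, zero_add]
  unfold pvRowS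
  apply Finset.sum_congr rfl
  intro j _
  simp [PySem.List.pyGetD_natCast, pvCell]

lemma pv_gval (t : List (List Int)) (j : Nat) :
    (PySem.List.pyRange 0 (t.length : Int)).foldl
      (fun acc i => acc + PySem.List.pyGetD (PySem.List.pyGetD t i []) (j : Int) 0) 0 = pvColS t j := by
  rw [PySem.List.pyRange_zero]
  simp only [Int.toNat_natCast, List.foldl_map, PySem.List.foldl_add, pv_sum_range, zero_add]
  unfold pvColS
  apply Finset.sum_congr rfl
  intro i _
  simp [PySem.List.pyGetD_natCast, pvCell]

lemma pv_rowsum (t : List (List Int)) :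
    (((PySem.List.pyRange 0 (t.length : Int)).map (fun i =>
      (PySem.List.pyRange 0 (t.length : Int)).foldl
        (fun acc j => acc + PySem.List.pyGetD (PySem.List.pyGetD t i []) j 0) 0)).sum)
    = ∑ i ∈ Finset.range t.length, pvRowS t i := by
  rw [PySem.List.pyRange_zero]
  simp only [Int.toNat_natCast, List.map_map]
  rw [pv_sum_range]
  apply Finset.sum_congr rfl
  intro i _
  simp only [Function.comp_apply]
  rw [show List.map (fun k : Nat => ((k : Nat) : Int)) (List.range t.length)
      = PySem.List.pyRange 0 (t.length : Int) by rw [PySem.List.pyRange_zero, Int.toNat_natCast]]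
  exact pv_fval t i

-- one guarded row-subtraction step of B's first correction loop
lemma pv_row_step (t : List (List Int)) (r res : Int) :
    (if 0 ≤ r ∧ r < (t.length : Int) then
      res - PySem.List.pyGetD ((PySem.List.pyRange 0 (t.length : Int)).map (fun i =>
        (PySem.List.pyRange 0 (t.length : Int)).foldl
          (fun acc j => acc + PySem.List.pyGetD (PySem.List.pyGetD t i []) j 0) 0)) r 0
     else res)
    = res - (if 0 ≤ r ∧ r < (t.length : Int) then pvRowS t r.toNat else 0) := by
  split_ifs with h
  · rw [PySem.List.pyGetD_map_pyRange_of_nonneg _ _ _ _ h.1 h.2]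
    have hr : r = ((r.toNat : Nat) : Int) := by omega
    conv_lhs => rw [hr]
    rw [pv_fval]
  · simp

-- one guarded column-subtraction step of B's second correction loop
lemma pv_col_step (t : List (List Int)) (c res : Int) :
    (if 0 ≤ c ∧ c < (t.length : Int) then
      res - PySem.List.pyGetD ((PySem.List.pyRange 0 (t.length : Int)).map (fun j =>
        (PySem.List.pyRange 0 (t.length : Int)).foldl
          (fun acc i => acc + PySem.List.pyGetD (PySem.List.pyGetD t i []) j 0) 0)) c 0
     else res)
    = res - (if 0 ≤ c ∧ c < (t.length : Int) then pvColS t c.toNat else 0) := by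
  split_ifs with h
  · rw [PySem.List.pyGetD_map_pyRange_of_nonneg _ _ _ _ h.1 h.2]
    have hc : c = ((c.toNat : Nat) : Int) := by omega
    conv_lhs => rw [hc]
    rw [pv_gval]
  · simp

-- one guarded re-addition step of B's intersection loop
lemma pv_cell_step (t : List (List Int)) (r c res : Int) :
    (if (0 ≤ r ∧ r < (t.length : Int)) ∧ (0 ≤ c ∧ c < (t.length : Int)) then
      res + PySem.List.pyGetD (PySem.List.pyGetD t r []) c 0 else res)
    = res + (if (0 ≤ r ∧ r < (t.length : Int)) ∧ (0 ≤ c ∧ c < (t.length : Int)) then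
        pvCell t r.toNat c.toNat else 0) := by
  split_ifs with h
  · have hr : r = ((r.toNat : Nat) : Int) := by omega
    have hc : c = ((c.toNat : Nat) : Int) := by omega
    conv_lhs => rw [hr, hc]
    rw [PySem.List.pyGetD_natCast, PySem.List.pyGetD_natCast]
    rfl
  · simp

-- ite-shuffling used to match B's flat guards with pvE's nested ones
lemma pv_ite_pair (P : Prop) [Decidable P] (x y : Int) :
    (if P then x + y else 0) = (if P then x else 0) + (if P then y else 0) := by
  split_ifs <;> simp

lemma pv_ite_ite (P Q : Prop) [Decidable P] [Decidable Q] (v : Int) :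
    (if P then (if Q then v else 0) else 0) = if P ∧ Q then v else 0 := by
  split_ifs <;> tauto

lemma pv_B_eq (t : List (List Int)) (r1 c1 r2 c2 : Int) :
    sumOfTableWithout_alt t r1 c1 r2 c2 = pvE t r1 c1 r2 c2 := by
  unfold sumOfTableWithout_alt pvE
  dsimp only
  rcases eq_or_ne r2 r1 with h21 | h21 <;> rcases eq_or_ne c2 c1 with hc21 | hc21 <;>
    simp only [h21, hc21, ne_eq, eq_self_iff_true, not_true_eq_false, not_false_eq_true,
      if_true, if_false, List.cons_append, List.nil_append, List.append_nil,
      List.foldl_cons, List.foldl_nil, true_and, false_and,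
      pv_row_step, pv_col_step, pv_cell_step, pv_rowsum,
      pv_ite_pair, pv_ite_ite, ite_self, add_zero, zero_add] <;>
    ring

-- ===== VERDICT (by name: the statement is the Claim_ definition above) =====
theorem sumOfTableWithout_spec : Claim_equal_sumOfTableWithout := by
  intro t r1 c1 r2 c2 _ _
  unfold Spec_sumOfTableWithout
  rw [pv_A_eq, pv_B_eq]
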